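-- pv_equiv track=rewrite | github.com/Buscedv/Ask | ask/transpiler/utilities/lexer_utils.py | fix_up_code_line
-- ===== SOURCE A (Python) =====
-- from typing import List, Tuple
--
-- def add_part(parts: list, is_string: bool, code: str) -> Tuple[list, str, bool]:
-- 	parts.append({
-- 		'is_string': is_string,
-- 		'code': code
-- 	})
--
-- 	is_string = True
--
-- 	if code[-1] == '\n':
-- 		is_string = False
--
-- 	return parts, '', is_string
--
-- def fix_up_code_line(statement: str) -> str:
-- 	statement = statement.replace("'", '"')
--
-- 	parts = []
-- 	is_string = False
-- 	tmp = ''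
--
-- 	for char in statement:
-- 		tmp += char
--
-- 		if char == '"' and is_string:
-- 			parts, tmp, is_string = add_part(parts, True, tmp)
-- 			is_string = False
-- 		elif char in ['"', '\n']:
-- 			parts, tmp, is_string = add_part(parts, False, tmp)
--
-- 	statement = ''
-- 	for part in parts:
-- 		if not part['is_string']:
-- 			part['code'] = part['code'] \
-- 				.replace('    ', '\t') \
-- 				.replace('  ', '\t') \
-- 				.replace(' (', '(')
--
-- 		statement += part['code']
--
-- 	return statement
-- ===== SOURCE B (Python) =====
-- def fix_up_code_line(statement: str) -> str:
-- 	def fix(code):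
-- 		return code.replace('    ', '\t').replace('  ', '\t').replace(' (', '(')
--
-- 	def go(s, in_string):
-- 		i = next((k for k, c in enumerate(s) if c in ('"', '\n')), None)
-- 		if i is None:
-- 			return ''
-- 		chunk, rest = s[:i + 1], s[i + 1:]
-- 		if s[i] == '"' and in_string:
-- 			return chunk + go(rest, False)
-- 		return fix(chunk) + go(rest, s[i] == '"')
--
-- 	return go(statement.replace("'", '"'), False)
-- ===== Notes on version B (the rewrite author's own statement) =====
-- stated objective: alternative
-- what changed: Replaces A's char-by-char state machine that accumulates tmp into a list of is_string-tagged dict parts and then rewrites them in a second pass by a single recursive descent that jumps to the next delimiter with a find, slices out the chunk, applies the whitespace fixes immediately for non-string chunks, and concatenates the results.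
import Mathlib
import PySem

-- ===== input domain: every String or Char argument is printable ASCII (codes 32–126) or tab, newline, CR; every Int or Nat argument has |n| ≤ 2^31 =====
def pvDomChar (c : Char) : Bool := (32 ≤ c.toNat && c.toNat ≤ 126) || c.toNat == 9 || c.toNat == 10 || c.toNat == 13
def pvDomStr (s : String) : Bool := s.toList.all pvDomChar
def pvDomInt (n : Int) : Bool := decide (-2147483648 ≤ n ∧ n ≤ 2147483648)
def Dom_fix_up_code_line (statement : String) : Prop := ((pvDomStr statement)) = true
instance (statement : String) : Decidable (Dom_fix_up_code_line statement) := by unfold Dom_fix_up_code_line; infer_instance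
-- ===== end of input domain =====

-- B replaces A's two-pass char-by-char state machine (tmp accumulation into a list of
-- tagged parts, then a rewrite pass) by one recursive descent: find the next delimiter,
-- slice off the chunk, fix it immediately if non-string, recurse on the rest. Same cost.


-- ===== PORT A =====
-- the three whitespace replaces applied to a non-string part (shared literal helper)
def pvFix (code : List Char) : List Char :=
  PySem.Chars.replace (PySem.Chars.replace (PySem.Chars.replace code "    ".toList "\t".toList)
    "  ".toList "\t".toList) " (".toList "(".toList

-- add_part: parts are (is_string, code) pairs; code[-1] via PySem pyGet? (exact)
def pvAddPart (parts : List (Bool × List Char)) (is_string : Bool) (code : List Char) :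
    List (Bool × List Char) × List Char × Bool :=
  let parts := parts ++ [(is_string, code)]
  let is_string := true
  let is_string := if PySem.List.pyGet? code (-1) = some '\n' then false else is_string
  (parts, [], is_string)

-- the body of A's first for-loop; state (parts, is_string, tmp)
def pvStepA (st : List (Bool × List Char) × Bool × List Char) (c : Char) :
    List (Bool × List Char) × Bool × List Char :=
  let parts := st.1
  let is_string := st.2.1
  let tmp := st.2.2 ++ [c]
  if c = '"' ∧ is_string = true then
    let r := pvAddPart parts true tmp
    (r.1, false, r.2.1)
  else if c = '"' ∨ c = '\n' then
    let r := pvAddPart parts false tmp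
    (r.1, r.2.2, r.2.1)
  else (parts, is_string, tmp)

def fix_up_code_line (statement : String) : String :=
  String.ofList
    ((((PySem.Chars.replace statement.toList "'".toList "\"".toList).foldl
        pvStepA ([], false, [])).1).foldl
      (fun acc p => acc ++ (if p.1 = true then p.2 else pvFix p.2)) [])

-- ===== PORT B =====
def pvDelim (c : Char) : Bool := c == '"' || c == '\n'

-- Source B's go: next delimiter index (findIdx?), chunk = s[:i+1], rest = s[i+1:]
-- (nonnegative in-range slices: s.take/s.drop, exact by PySem.List.slice_to_natCast/slice_from_natCast)
def pvGoB (s : List Char) (in_string : Bool) : List Char :=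
  match hi : s.findIdx? pvDelim with
  | none => []
  | some i =>
      if PySem.List.pyGet? s (i : Int) = some '"' ∧ in_string = true then
        s.take (i + 1) ++ pvGoB (s.drop (i + 1)) false
      else
        pvFix (s.take (i + 1)) ++
          pvGoB (s.drop (i + 1)) (decide (PySem.List.pyGet? s (i : Int) = some '"'))
termination_by s.length
decreasing_by
  all_goals
    cases s with
    | nil => simp at hi
    | cons a l => simp [List.length_drop]

def fix_up_code_line_alt (statement : String) : String :=
  String.ofList (pvGoB (PySem.Chars.replace statement.toList "'".toList "\"".toList) false)

-- ===== PRECONDITION & SPEC =====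
def Spec_fix_up_code_line (statement : String) (out : String) : Prop := out = fix_up_code_line_alt statement
instance (statement : String) (out : String) : Decidable (Spec_fix_up_code_line statement out) := by unfold Spec_fix_up_code_line; infer_instance

-- ===== CLAIM (what is proved, stated in full; the proofs are below) =====
def Claim_equal_fix_up_code_line : Prop := ∀ (statement : String), Dom_fix_up_code_line statement → Spec_fix_up_code_line statement (fix_up_code_line statement)

-- ===== LEMMAS AND PROOFS =====

-- reference: A's first loop as a tagger producing (is_string, chunk) pairs
def pvTagged (flag : Bool) (tmp : List Char) : List Char → List (Bool × List Char)
  | [] => []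
  | c :: cs =>
    if c = '"' then
      if flag then (true, tmp ++ [c]) :: pvTagged false [] cs
      else (false, tmp ++ [c]) :: pvTagged true [] cs
    else if c = '\n' then (false, tmp ++ [c]) :: pvTagged false [] cs
    else pvTagged flag (tmp ++ [c]) cs

def pvRender (ps : List (Bool × List Char)) : List Char :=
  ps.flatMap (fun p => if p.1 = true then p.2 else pvFix p.2)

theorem pvLoopA_eq (cs : List Char) : ∀ (parts : List (Bool × List Char)) (flag : Bool) (tmp : List Char),
    (cs.foldl pvStepA (parts, flag, tmp)).1 = parts ++ pvTagged flag tmp cs := by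
  induction cs with
  | nil => intro parts flag tmp; simp [pvTagged]
  | cons c cs ih =>
    intro parts flag tmp
    simp only [List.foldl_cons, pvStepA, pvAddPart, pvTagged]
    by_cases hq : c = '"'
    · by_cases hf : flag = true
      · simp [hq, hf, ih]
      · simp [hq, hf, ih, PySem.List.pyGet?_neg_one_append_singleton]
    · by_cases hn : c = '\n'
      · simp [hn, ih, PySem.List.pyGet?_neg_one_append_singleton]
      · simp [hq, hn, ih]

theorem pvGoB_none (s : List Char) (flag : Bool) (h : s.findIdx? pvDelim = none) :
    pvGoB s flag = [] := by
  rw [pvGoB.eq_def]; split <;> simp_all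

theorem pvGoB_some (s : List Char) (flag : Bool) (i : Nat) (h : s.findIdx? pvDelim = some i) :
    pvGoB s flag =
      if PySem.List.pyGet? s (i : Int) = some '"' ∧ flag = true then
        s.take (i + 1) ++ pvGoB (s.drop (i + 1)) false
      else
        pvFix (s.take (i + 1)) ++
          pvGoB (s.drop (i + 1)) (decide (PySem.List.pyGet? s (i : Int) = some '"')) := by
  rw [pvGoB.eq_def]; split <;> simp_all

theorem pvGoB_eq (s : List Char) : ∀ (flag : Bool) (pre : List Char),
    (∀ c ∈ pre, pvDelim c = false) →
    pvGoB (pre ++ s) flag = pvRender (pvTagged flag pre s) := by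
  induction s with
  | nil =>
    intro flag pre h
    rw [pvGoB_none _ _ (by rw [List.findIdx?_eq_none_iff]; intro x hx; exact h x (by simpa using hx))]
    simp [pvTagged, pvRender]
  | cons c cs ih =>
    intro flag pre h
    by_cases hc : pvDelim c = true
    · -- delimiter found at index pre.length
      have hfind : (pre ++ c :: cs).findIdx? pvDelim = some pre.length := by
        rw [List.findIdx?_append]
        have h1 : pre.findIdx? pvDelim = none := List.findIdx?_eq_none_iff.2 h
        simp [h1, List.findIdx?_cons, hc]
      have hget : PySem.List.pyGet? (pre ++ c :: cs) ((pre.length : Nat) : Int) = some c :=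
        PySem.List.pyGet?_append_length pre cs c
      have htake : (pre ++ c :: cs).take (pre.length + 1) = pre ++ [c] := by
        rw [List.take_append]; simp
      have hdrop : (pre ++ c :: cs).drop (pre.length + 1) = cs := by
        rw [List.drop_append]; simp
      have hcs_f := ih false [] (by simp)
      have hcs_t := ih true [] (by simp)
      simp only [List.nil_append] at hcs_f hcs_t
      rw [pvGoB_some _ _ _ hfind, htake, hdrop, hget]
      have hq_or : c = '"' ∨ c = '\n' := by
        simpa [pvDelim] using hc
      by_cases hq : c = '"'
      · by_cases hf : flag = true
        · simp [pvTagged, pvRender, hq, hf, hcs_f]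
        · simp [pvTagged, pvRender, hq, hf, hcs_t]
      · have hn : c = '\n' := hq_or.resolve_left hq
        subst hn
        simp [pvTagged, pvRender, hcs_f, (by decide : ¬ ('\n' = '"'))]
    · -- c is not a delimiter: it joins the pending prefix
      have hcq : ¬ c = '"' := fun h' => by subst h'; simp [pvDelim] at hc
      have hcn : ¬ c = '\n' := fun h' => by subst h'; simp [pvDelim] at hc
      have hpre : ∀ x ∈ pre ++ [c], pvDelim x = false := by
        intro x hx
        rcases List.mem_append.1 hx with h1 | h1
        · exact h x h1
        · simp only [List.mem_singleton] at h1; subst h1; simpa using hc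
      have := ih flag (pre ++ [c]) hpre
      simp only [List.append_assoc, List.singleton_append] at this
      rw [this]
      simp [pvTagged, hcq, hcn]

theorem pvFoldRender (ps : List (Bool × List Char)) :
    ps.foldl (fun acc p => acc ++ (if p.1 = true then p.2 else pvFix p.2)) [] = pvRender ps := by
  simpa [pvRender] using
    PySem.List.foldl_append_eq_flatMap (l := ps)
      (g := fun p => if p.1 = true then p.2 else pvFix p.2) (acc := [])

-- ===== VERDICT (by name: the statement is the Claim_ definition above) =====
theorem fix_up_code_line_spec : Claim_equal_fix_up_code_line := by
  intro statement _
  unfold Spec_fix_up_code_line fix_up_code_line fix_up_code_line_alt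
  rw [pvLoopA_eq, pvFoldRender]
  rw [show PySem.Chars.replace statement.toList "'".toList "\"".toList =
      [] ++ PySem.Chars.replace statement.toList "'".toList "\"".toList from rfl]
  rw [pvGoB_eq _ false [] (by simp)]
  simp
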